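-- pv_equiv track=rewrite | github.com/rishubil/textual-code | src/textual_code/search.py | _build_line_offsets
-- ===== SOURCE A (Python) =====
-- def _build_line_offsets(text: str) -> list[int]:
--     """Return a list of character offsets where each line starts.
--
--     ``offsets[i]`` is the character offset of line ``i+1`` (1-based line numbers).
--     """
--     offsets = [0]
--     pos = 0
--     while True:
--         pos = text.find("\n", pos)
--         if pos == -1:
--             break
--         pos += 1  # skip past the newline
--         offsets.append(pos)
--     return offsets
-- ===== SOURCE B (Python) =====
-- def _build_line_offsets(text: str) -> list[int]:
--     """Return a list of character offsets where each line starts."""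
--     offsets = [0]
--     run = 0
--     for part in text.split("\n")[:-1]:
--         run += len(part) + 1
--         offsets.append(run)
--     return offsets
-- ===== Notes on version B (the rewrite author's own statement) =====
-- stated objective: simpler
-- what changed: Replaces the repeated str.find scanning loop with a single split on the newline separator followed by a prefix sum of part lengths over all parts but the last.
import Mathlib
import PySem

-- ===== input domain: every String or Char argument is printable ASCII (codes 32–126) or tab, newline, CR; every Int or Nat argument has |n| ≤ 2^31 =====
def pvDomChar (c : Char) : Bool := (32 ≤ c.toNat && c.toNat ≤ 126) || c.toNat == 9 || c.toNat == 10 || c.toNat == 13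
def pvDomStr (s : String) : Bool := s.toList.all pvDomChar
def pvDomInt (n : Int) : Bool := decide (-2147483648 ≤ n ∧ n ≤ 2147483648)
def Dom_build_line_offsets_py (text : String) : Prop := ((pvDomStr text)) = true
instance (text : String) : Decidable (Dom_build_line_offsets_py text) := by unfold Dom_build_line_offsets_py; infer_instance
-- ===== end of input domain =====

-- B replaces A's repeated str.find scanning loop by one split on the newline separator
-- plus a prefix sum of part lengths (objective: simpler).

-- ===== PORT A =====

-- Termination fact the loop below cites: a successful find lies in [pos, s.length).
theorem pv_findFrom_bounds (s : List Char) (pos : Nat)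
    (h : PySem.Chars.findFrom s ['\n'] (pos : Int) none ≠ -1) :
    pos ≤ (PySem.Chars.findFrom s ['\n'] (pos : Int) none).toNat ∧
    (PySem.Chars.findFrom s ['\n'] (pos : Int) none).toNat < s.length := by
  by_cases hle : pos ≤ s.length
  · have hspec := PySem.Chars.findFrom_natCast_spec s ['\n'] pos hle h
    obtain ⟨h1, h2, _⟩ := hspec
    constructor
    · omega
    · have hlen := h2.length_le
      have hpos : 0 ≤ PySem.Chars.findFrom s ['\n'] (pos : Int) none := by omega
      simp [List.length_drop] at hlen
      omega
  · exfalso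
    apply h
    have hlt : (s.length : Int) < (pos : Int) := by exact_mod_cast Nat.lt_of_not_le hle
    have h0 : ¬((pos : Int) < 0) := by omega
    simp only [PySem.Chars.findFrom, if_neg h0, if_pos hlt]

-- the `while True: pos = text.find("\n", pos); …` loop of A, state = (pos, offsets)
def build_line_offsets_py_loop (s : List Char) (pos : Nat) (acc : List Int) : List Int :=
  if h : PySem.Chars.findFrom s ['\n'] (pos : Int) none = -1 then acc
  else
    build_line_offsets_py_loop s ((PySem.Chars.findFrom s ['\n'] (pos : Int) none).toNat + 1)
      (acc ++ [(((PySem.Chars.findFrom s ['\n'] (pos : Int) none).toNat + 1 : Nat) : Int)])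
termination_by s.length + 1 - pos
decreasing_by
  have := pv_findFrom_bounds s pos h
  omega

def build_line_offsets_py (text : String) : List Int :=
  build_line_offsets_py_loop text.toList 0 [0]

-- ===== PORT B =====
def build_line_offsets_py_alt (text : String) : List Int :=
  -- parts = text.split("\n")
  let parts := PySem.Chars.splitOn text.toList ['\n']
  -- for part in parts[:-1]: run += len(part) + 1; offsets.append(run)
  ((PySem.List.slice parts none (some (-1))).foldl
    (fun (st : List Int × Int) part =>
      ((st.1 ++ [st.2 + (part.length : Int) + 1]), st.2 + (part.length : Int) + 1))
    ([0], 0)).1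

-- ===== PRECONDITION & SPEC =====
def Spec_build_line_offsets_py (text : String) (out : List Int) : Prop := out = build_line_offsets_py_alt text
instance (text : String) (out : List Int) : Decidable (Spec_build_line_offsets_py text out) := by unfold Spec_build_line_offsets_py; infer_instance

-- ===== CLAIM (what is proved, stated in full; the proofs are below) =====
def Claim_equal_build_line_offsets_py : Prop := ∀ (text : String), Dom_build_line_offsets_py text → Spec_build_line_offsets_py text (build_line_offsets_py text)

-- ===== LEMMAS AND PROOFS =====

def pvRef (t : List Char) (n : Int) : List Int :=
  match t with
  | [] => []
  | c :: u => if c = '\n' then (n + 1) :: pvRef u (n + 1) else pvRef u (n + 1)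
def pvSplit (t : List Char) : List (List Char) :=
  match t with
  | [] => [[]]
  | c :: u => if c = '\n' then [] :: pvSplit u else (pvSplit u).modifyHead (c :: ·)

theorem pvSplit_ne_nil (t : List Char) : pvSplit t ≠ [] := by
  induction t with
  | nil => simp [pvSplit]
  | cons c u ih =>
    simp only [pvSplit]
    split
    · simp
    · cases h : pvSplit u with
      | nil => exact absurd h ih
      | cons a l => simp [List.modifyHead]

theorem pv_go_shift (l : List Char) : ∀ (k : Nat),
    PySem.Chars.find.go ['\n'] l k =
      if PySem.Chars.find l ['\n'] = -1 then -1
      else (k : Int) + PySem.Chars.find l ['\n'] := by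
  induction l with
  | nil => intro k; simp [PySem.Chars.find, PySem.Chars.find.go]
  | cons c t ih =>
    intro k
    rw [PySem.Chars.find.go]
    rw [show PySem.Chars.find (c :: t) ['\n'] = PySem.Chars.find.go ['\n'] (c :: t) 0 from rfl]
    rw [PySem.Chars.find.go]
    by_cases hp : List.isPrefixOf ['\n'] (c :: t) = true
    · simp [hp]
    · simp only [hp, Bool.false_eq_true, if_false]
      rw [ih (k+1), ih 1]
      have hb := PySem.Chars.neg_one_le_find t ['\n']
      split
      · simp
      · rw [if_neg (show ¬(((1:Nat) : Int) + PySem.Chars.find t ['\n'] = -1) by push_cast; omega)]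
        push_cast
        omega

theorem pv_find_cons (c : Char) (t : List Char) :
    PySem.Chars.find (c :: t) ['\n'] =
      if c = '\n' then 0
      else if PySem.Chars.find t ['\n'] = -1 then -1 else PySem.Chars.find t ['\n'] + 1 := by
  rw [show PySem.Chars.find (c :: t) ['\n'] = PySem.Chars.find.go ['\n'] (c :: t) 0 from rfl]
  rw [PySem.Chars.find.go]
  by_cases hc : c = '\n'
  · simp [hc, List.isPrefixOf]
  · have hp : List.isPrefixOf ['\n'] (c :: t) = false := by
      simp [List.isPrefixOf]
      exact fun h => hc (h ▸ rfl)
    simp only [hp, Bool.false_eq_true, if_false, hc, if_false]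
    rw [pv_go_shift]
    split <;> omega

theorem pv_ref_find (t : List Char) : ∀ (n : Int),
    pvRef t n =
      if PySem.Chars.find t ['\n'] = -1 then []
      else (n + PySem.Chars.find t ['\n'] + 1) ::
        pvRef (t.drop ((PySem.Chars.find t ['\n']).toNat + 1))
          (n + PySem.Chars.find t ['\n'] + 1) := by
  induction t with
  | nil => intro n; simp [pvRef, PySem.Chars.find, PySem.Chars.find.go]
  | cons c u ih =>
    intro n
    rw [pv_find_cons]
    by_cases hc : c = '\n'
    · simp [pvRef, hc]
    · simp only [hc, if_false, pvRef]
      rw [ih (n+1)]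
      have hb := PySem.Chars.neg_one_le_find u ['\n']
      by_cases hf : PySem.Chars.find u ['\n'] = -1
      · simp [hf]
      · simp only [hf, if_false]
        rw [if_neg (by omega : ¬(PySem.Chars.find u ['\n'] + 1 = -1))]
        have ht : (PySem.Chars.find u ['\n'] + 1).toNat = (PySem.Chars.find u ['\n']).toNat + 1 := by omega
        rw [ht]
        simp only [List.drop_succ_cons]
        have he : n + (PySem.Chars.find u ['\n'] + 1) + 1 = n + 1 + PySem.Chars.find u ['\n'] + 1 := by ring
        rw [he]

theorem pv_go_spec (l : List Char) : ∀ (fuel : Nat) (cur : List Char) (acc : List (List Char)),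
    l.length < fuel →
    PySem.Chars.splitOn.go ['\n'] fuel l cur acc =
      acc.reverse ++ (pvSplit l).modifyHead (cur.reverse ++ ·) := by
  induction l with
  | nil =>
    intro fuel cur acc hf
    cases fuel with
    | zero => simp at hf
    | succ fuel =>
      rw [PySem.Chars.splitOn.go]
      · simp [pvSplit]
      · omega
  | cons c u ih =>
    intro fuel cur acc hf
    match fuel with
    | fuel + 1 =>
      rw [PySem.Chars.splitOn.go]
      by_cases hc : c = '\n'
      · have hp : List.isPrefixOf ['\n'] (c :: u) = true := by simp [List.isPrefixOf, hc]
        simp only [hp, if_pos, List.length_cons, List.length_nil, List.drop_succ_cons, List.drop_zero]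
        rw [ih fuel [] (cur.reverse :: acc) (by simp at hf ⊢; omega)]
        simp only [pvSplit, hc, if_pos, List.reverse_cons]
        cases h : pvSplit u with
        | nil => exact absurd h (pvSplit_ne_nil u)
        | cons a t => simp [List.modifyHead]
      · have hp : List.isPrefixOf ['\n'] (c :: u) = false := by
          simp [List.isPrefixOf]
          exact fun h => hc (h ▸ rfl)
        simp only [hp, Bool.false_eq_true, if_false]
        rw [ih fuel (c :: cur) acc (by simp at hf ⊢; omega)]
        simp only [pvSplit, hc, if_false]
        cases h : pvSplit u with
        | nil => exact absurd h (pvSplit_ne_nil u)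
        | cons a t => simp [List.modifyHead]

theorem pv_splitOn_eq (s : List Char) : PySem.Chars.splitOn s ['\n'] = pvSplit s := by
  rw [PySem.Chars.splitOn, pv_go_spec s (s.length + 1) [] [] (by omega)]
  cases h : pvSplit s with
  | nil => exact absurd h (pvSplit_ne_nil s)
  | cons a t => simp [List.modifyHead]

theorem pv_loop_aux (s : List Char) : ∀ (k : Nat), ∀ (pos : Nat) (acc : List Int),
    s.length - pos ≤ k → pos ≤ s.length →
    build_line_offsets_py_loop s pos acc = acc ++ pvRef (s.drop pos) (pos : Int) := by
  intro k
  induction k with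
  | zero =>
    intro pos acc hk hpos
    have hps : pos = s.length := by omega
    rw [build_line_offsets_py_loop]
    rw [dif_pos]
    · subst hps; simp [pvRef]
    · subst hps
      rw [PySem.Chars.findFrom_natCast s ['\n'] s.length le_rfl]
      simp [PySem.Chars.find, PySem.Chars.find.go]
  | succ k ih =>
    intro pos acc hk hpos
    rw [build_line_offsets_py_loop]
    rw [pv_ref_find]
    have hff := PySem.Chars.findFrom_natCast s ['\n'] pos hpos
    by_cases hf : PySem.Chars.find (s.drop pos) ['\n'] = -1
    · rw [dif_pos (by rw [hff]; simp [hf]), if_pos hf]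
      simp
    · have hb := PySem.Chars.neg_one_le_find (s.drop pos) ['\n']
      have h0 : 0 ≤ PySem.Chars.find (s.drop pos) ['\n'] := by omega
      have hpre := (PySem.Chars.find_spec h0).1
      have hlen : (PySem.Chars.find (s.drop pos) ['\n']).toNat < (s.drop pos).length := by
        have h1 := hpre.length_le
        rw [List.length_drop] at h1
        simp only [List.length_cons, List.length_nil] at h1
        omega
      have hdl : (s.drop pos).length = s.length - pos := by simp
      have hne : ¬ PySem.Chars.findFrom s ['\n'] (pos : Int) none = -1 := by
        rw [hff]; simp [hf]; omega
      rw [dif_neg hne, if_neg hf]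
      have hv : (PySem.Chars.findFrom s ['\n'] (pos : Int) none).toNat
          = pos + (PySem.Chars.find (s.drop pos) ['\n']).toNat := by
        rw [hff, if_neg hf]; omega
      rw [hv]
      rw [ih (pos + (PySem.Chars.find (s.drop pos) ['\n']).toNat + 1) _ (by omega) (by omega)]
      have hdd : s.drop (pos + (PySem.Chars.find (s.drop pos) ['\n']).toNat + 1)
          = (s.drop pos).drop ((PySem.Chars.find (s.drop pos) ['\n']).toNat + 1) := by
        rw [List.drop_drop]
        ring_nf
      rw [hdd]
      have hcast : ((pos + (PySem.Chars.find (s.drop pos) ['\n']).toNat + 1 : Nat) : Int)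
          = (pos : Int) + PySem.Chars.find (s.drop pos) ['\n'] + 1 := by
        push_cast
        omega
      rw [hcast]
      simp

theorem pv_loop_spec (s : List Char) : ∀ (pos : Nat) (acc : List Int), pos ≤ s.length →
    build_line_offsets_py_loop s pos acc = acc ++ pvRef (s.drop pos) (pos : Int) := by
  intro pos acc hpos
  exact pv_loop_aux s s.length pos acc (by omega) hpos

theorem pv_fold_spec (t : List Char) : ∀ (run : Int) (acc : List Int),
    (((pvSplit t).dropLast).foldl
      (fun (st : List Int × Int) part =>
        ((st.1 ++ [st.2 + (part.length : Int) + 1]), st.2 + (part.length : Int) + 1))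
      (acc, run)).1 = acc ++ pvRef t run := by
  induction t with
  | nil => intro run acc; simp [pvSplit, pvRef]
  | cons c u ih =>
    intro run acc
    by_cases hc : c = '\n'
    · simp only [pvSplit, hc, if_pos, pvRef]
      cases h : pvSplit u with
      | nil => exact absurd h (pvSplit_ne_nil u)
      | cons a t =>
        simp only [List.dropLast_cons₂, List.foldl_cons, List.length_nil]
        have := ih (run + 1) (acc ++ [run + 1])
        rw [h] at this
        simp only [Nat.cast_zero] at *
        rw [show run + 0 + 1 = run + 1 by ring]
        rw [this]
        simp
    · simp only [pvSplit, hc, if_false, pvRef]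
      cases h : pvSplit u with
      | nil => exact absurd h (pvSplit_ne_nil u)
      | cons a t =>
        have hIH := ih (run + 1) acc
        rw [h] at hIH
        simp only [List.modifyHead]
        cases t with
        | nil =>
          simp only [List.dropLast_singleton, List.foldl_nil] at hIH ⊢
          exact hIH
        | cons b l =>
          simp only [List.dropLast_cons₂, List.foldl_cons] at hIH ⊢
          rw [← hIH]
          congr 2; (simp [List.length_cons]; ring)

theorem pv_slice_dropLast (xs : List (List Char)) :
    PySem.List.slice xs none (some (-1)) = xs.dropLast := by
  simp only [PySem.List.slice, Int.reduceNeg, Order.lt_one_iff, PySem.List.clampIdx_neg_ofNat,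
    tsub_zero, List.drop_zero]
  exact List.dropLast_eq_take.symm

-- ===== VERDICT (by name: the statement is the Claim_ definition above) =====
theorem build_line_offsets_py_spec : Claim_equal_build_line_offsets_py := by
  intro text _
  unfold Spec_build_line_offsets_py build_line_offsets_py build_line_offsets_py_alt
  rw [pv_loop_spec text.toList 0 [0] (Nat.zero_le _)]
  simp only [pv_splitOn_eq, pv_slice_dropLast, pv_fold_spec]
  simp
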